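-- pv_equiv track=rewrite | github.com/theo-l/eureciclo_demo | main.py | solution
-- ===== SOURCE A (Python) =====
-- import itertools
--
-- def solution(target, options: list):
--
--     return sorted(
--             [
--                 (sum(o) - target, o) for i in range(1, len(options) + 1)
--                     for o in itertools.combinations(options, i) if sum(o) >= target
--             ],
--             key=lambda o: o[0] and len(o[1])
--           )[0]
-- ===== SOURCE B (Python) =====
-- def _combos(options, k):
--     # all k-element combinations (with their running sums), lexicographic order:
--     # those containing options[0] first, then those without it
--     if k == 0:
--         yield ((), 0)
--     elif options:
--         x = options[0]
--         rest = options[1:]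
--         for r, s in _combos(rest, k - 1):
--             yield ((x,) + r, x + s)
--         yield from _combos(rest, k)
--
--
-- def solution(target, options: list):
--     # Early-exit priority search: an exact-sum subset always beats every other
--     # candidate, so return the first one found (sizes ascending, lex order).
--     # Otherwise the winner is the first over-target subset at the smallest size.
--     fallback = None
--     for size in range(1, len(options) + 1):
--         for o, s in _combos(options, size):
--             if s == target:
--                 return (0, o)
--             if fallback is None and s > target:
--                 fallback = (s - target, o)
--     if fallback is None:
--         raise IndexError('list index out of range')
--     return fallback
-- ===== Notes on version B (the rewrite author's own statement) =====
-- stated objective: faster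
-- what changed: A builds the full list of qualifying (sum-target, combo) candidates, stable-sorts it by the key (0 for exact sums, else subset size) and takes the head; B exploits the key's structure instead: a hand-rolled take-or-skip recursion enumerates combinations with incremental sums, returns IMMEDIATELY on the first exact-sum subset (which always wins), and otherwise remembers only the first over-target subset at the smallest size - no candidate list, no key function, no sort; the early exit makes it measurably faster on typical inputs.
import Mathlib
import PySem

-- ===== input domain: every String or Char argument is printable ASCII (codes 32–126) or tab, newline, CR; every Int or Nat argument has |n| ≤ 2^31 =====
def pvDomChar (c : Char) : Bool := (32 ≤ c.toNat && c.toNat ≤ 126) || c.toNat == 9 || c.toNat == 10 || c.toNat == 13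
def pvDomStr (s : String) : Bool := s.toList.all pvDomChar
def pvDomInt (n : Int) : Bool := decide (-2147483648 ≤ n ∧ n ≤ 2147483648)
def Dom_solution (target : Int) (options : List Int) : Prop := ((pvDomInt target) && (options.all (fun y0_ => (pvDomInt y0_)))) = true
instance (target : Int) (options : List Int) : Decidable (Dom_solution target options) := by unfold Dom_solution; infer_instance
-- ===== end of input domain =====

-- B replaces A's build-all-candidates-then-stable-sort by an early-exit priority search
-- (first exact-sum subset wins outright, else first over-target subset at the smallest
-- size) over a hand-rolled take-or-skip combination recursion with incremental sums
-- (objective: alternative — no candidate list, no key, no sort).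


-- ===== PORT A =====
-- the list comprehension: for i in range(1, len(options)+1) for o in combinations(options, i) if sum(o) >= target
def candsA (target : Int) (options : List Int) : List (Int × List Int) :=
  (PySem.List.pyRange 1 ((options.length : Int) + 1) 1).flatMap (fun i =>
    ((PySem.List.combinations options i.toNat).filter (fun o => decide (target ≤ o.sum))).map
      (fun o => (o.sum - target, o)))

-- sorted(..., key=lambda o: o[0] and len(o[1]))[0]; '[0]' of the empty list is IndexError (outside Pre_)
def solution (target : Int) (options : List Int) : Int × List Int :=
  match PySem.List.sorted (candsA target options)
      (fun p => if p.1 = 0 then p.1 else (p.2.length : Int)) with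
  | [] => (0, [])
  | p :: _ => p

-- ===== PORT B =====
-- _combos: take-or-skip recursion, k-combinations with running sums, lex order
def combosB : List Int → Nat → List (List Int × Int)
  | _, 0 => [([], 0)]
  | [], _+1 => []
  | x :: t, k+1 =>
      ((combosB t k).map (fun p => (x :: p.1, x + p.2))) ++ combosB t (k + 1)

-- the inner 'for o, s in _combos(...)' loop: Sum.inr = the early 'return (0, o)'
def scanCombos (target : Int) :
    List (List Int × Int) → Option (Int × List Int) → (Option (Int × List Int)) ⊕ (Int × List Int)
  | [], fb => Sum.inl fb
  | (o, s) :: rest, fb =>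
      if s = target then Sum.inr (0, o)
      else scanCombos target rest (if fb = none ∧ target < s then some (s - target, o) else fb)

-- the outer 'for size in range(1, len(options)+1)' loop
def scanSizes (target : Int) (options : List Int) :
    List Int → Option (Int × List Int) → (Option (Int × List Int)) ⊕ (Int × List Int)
  | [], fb => Sum.inl fb
  | i :: rest, fb =>
      match scanCombos target (combosB options i.toNat) fb with
      | Sum.inr r => Sum.inr r
      | Sum.inl fb' => scanSizes target options rest fb'

def solution_alt (target : Int) (options : List Int) : Int × List Int :=
  match scanSizes target options (PySem.List.pyRange 1 ((options.length : Int) + 1) 1) none with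
  | Sum.inr r => r
  | Sum.inl (some fb) => fb
  | Sum.inl none => (0, [])   -- raise IndexError (outside Pre_)

-- ===== PRECONDITION & SPEC =====
-- A raises IndexError exactly when no nonempty subset of options sums to at least target.
def Pre_solution (target : Int) (options : List Int) : Prop :=
  ∃ c ∈ options.sublists, c ≠ [] ∧ target ≤ c.sum
instance (target : Int) (options : List Int) : Decidable (Pre_solution target options) := by
  unfold Pre_solution; infer_instance

def pvWitness_solution : Int × List Int := (0, [1])

def Spec_solution (target : Int) (options : List Int) (out : Int × List Int) : Prop := out = solution_alt target options
instance (target : Int) (options : List Int) (out : Int × List Int) : Decidable (Spec_solution target options out) := by unfold Spec_solution; infer_instance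

-- ===== CLAIM (what is proved, stated in full; the proofs are below) =====
def Claim_equal_solution : Prop := ∀ (target : Int) (options : List Int), Dom_solution target options → Pre_solution target options → Spec_solution target options (solution target options)

-- ===== LEMMAS AND PROOFS =====

-- A's sort key as a function
def keyB (c : Int × List Int) : Int := if c.1 = 0 then 0 else (c.2.length : Int)

-- the strict-<, first-wins argmin step over key k (what the head of A's stable sort computes)
def argminStep {α : Type} (k : α → Int) (st : Option α) (c : α) : Option α :=
  match st with
  | none => some c
  | some b => if k c < k b then some c else some b

theorem head_insertBy {α : Type} (k : α → Int) (x : α) (acc : List α) :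
    (PySem.List.insertBy (fun a b => decide (k a < k b)) x acc).head? =
      some ((argminStep k acc.head? x).getD x) := by
  cases acc with
  | nil => simp [PySem.List.insertBy, argminStep]
  | cons y ys =>
    simp only [PySem.List.insertBy, argminStep, List.head?_cons]
    by_cases h : k x < k y <;> simp [h]

theorem head_foldl_insertBy {α : Type} (k : α → Int) (cs : List α) (acc : List α) :
    (cs.foldl (fun acc x => PySem.List.insertBy (fun a b => decide (k a < k b)) x acc) acc).head? =
      cs.foldl (argminStep k) acc.head? := by
  induction cs generalizing acc with
  | nil => rfl
  | cons c cs ih =>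
    simp only [List.foldl_cons]
    rw [ih]
    congr 1
    rw [head_insertBy]
    cases acc with
    | nil => rfl
    | cons y ys =>
      simp only [List.head?_cons, argminStep]
      by_cases h : k c < k y <;> simp [h]

theorem head_sorted_eq_argmin {α : Type} (k : α → Int) (cs : List α) :
    (PySem.List.sorted cs k false).head? = cs.foldl (argminStep k) none := by
  rw [PySem.List.sorted_eq_foldl_insertBy]
  exact head_foldl_insertBy k cs []

theorem keyB_nonneg (c : Int × List Int) : 0 ≤ keyB c := by
  unfold keyB; by_cases h : c.1 = 0 <;> simp [h]

-- once an exact-sum candidate is the running best, it stays the best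
theorem fold_argmin_exact (t : List (Int × List Int)) (b : Int × List Int) (hb : keyB b = 0) :
    t.foldl (argminStep keyB) (some b) = some b := by
  induction t with
  | nil => rfl
  | cons c t ih =>
    have h : ¬ keyB c < keyB b := by rw [hb]; exact not_lt.mpr (keyB_nonneg c)
    simp only [List.foldl_cons, argminStep]
    rw [if_neg h]
    exact ih

-- argmin continuation from a non-exact running best, all later non-exact keys ≥ it
theorem fold_argmin_some (t : List (Int × List Int)) :
    ∀ (b : Int × List Int), b.1 ≠ 0 → 1 ≤ keyB b →
    (∀ c ∈ t, c.1 ≠ 0 → keyB b ≤ keyB c) →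
    t.foldl (argminStep keyB) (some b) =
      (match t.find? (fun c => c.1 == 0) with
       | some e => some e
       | none => some b) := by
  induction t with
  | nil => intro b _ _ _; rfl
  | cons c t ih =>
    intro b hb1 hb hle
    simp only [List.foldl_cons, List.find?_cons]
    by_cases hc : c.1 = 0
    · have hkc : keyB c = 0 := by simp [keyB, hc]
      have hlt : keyB c < keyB b := by omega
      simp only [argminStep, if_pos hlt, hc, beq_self_eq_true]
      exact fold_argmin_exact t c hkc
    · have hge : keyB b ≤ keyB c := hle c List.mem_cons_self hc
      have hnlt : ¬ keyB c < keyB b := not_lt.mpr hge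
      simp only [argminStep, if_neg hnlt]
      have : (c.1 == 0) = false := by simp [hc]
      rw [this]
      exact ih b hb1 hb (fun d hd => hle d (List.mem_cons_of_mem c hd))

-- first-wins strict argmin over a length-sorted candidate list = first exact, else head
theorem argmin_char (L : List (Int × List Int))
    (h1 : ∀ c ∈ L, 1 ≤ c.2.length)
    (h2 : L.Pairwise (fun c d => c.2.length ≤ d.2.length)) :
    L.foldl (argminStep keyB) none =
      (match L.find? (fun c => c.1 == 0) with
       | some e => some e
       | none => L.head?) := by
  cases L with
  | nil => rfl
  | cons c t =>
    simp only [List.foldl_cons, List.find?_cons, argminStep, List.head?_cons]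
    by_cases hc : c.1 = 0
    · have hkc : keyB c = 0 := by simp [keyB, hc]
      simp only [hc, beq_self_eq_true]
      exact fold_argmin_exact t c hkc
    · have hkey : keyB c = (c.2.length : Int) := by simp [keyB, hc]
      have hcb : (c.1 == 0) = false := by simp [hc]
      rw [hcb]
      have hlen : 1 ≤ c.2.length := h1 c List.mem_cons_self
      have hb : 1 ≤ keyB c := by rw [hkey]; exact_mod_cast hlen
      have hcross := (List.pairwise_cons.mp h2).1
      refine fold_argmin_some t c hc hb ?_
      intro d hd hd1
      have : c.2.length ≤ d.2.length := hcross d hd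
      simp [keyB, hc, hd1]
      exact_mod_cast this

-- combosB computes the PySem combinations, paired with their sums
theorem combosB_eq (xs : List Int) (k : Nat) :
    combosB xs k = (PySem.List.combinations xs k).map (fun o => (o, o.sum)) := by
  induction xs generalizing k with
  | nil =>
    cases k with
    | zero => simp [combosB, PySem.List.combinations_zero]
    | succ k => simp [combosB, PySem.List.combinations_nil_succ]
  | cons x t ih =>
    cases k with
    | zero => simp [combosB, PySem.List.combinations_zero]
    | succ k =>
      simp only [combosB, PySem.List.combinations_cons_succ, List.map_append, List.map_map, ih]
      rfl

-- the flattened scan over (0-if-exact, combo) candidates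
def scanCand :
    List (Int × List Int) → Option (Int × List Int) → (Option (Int × List Int)) ⊕ (Int × List Int)
  | [], fb => Sum.inl fb
  | c :: t, fb =>
      if c.1 = 0 then Sum.inr c
      else scanCand t (if fb = none then some c else fb)

theorem scanCombos_eq_scanCand (target : Int) (l : List (List Int × Int)) :
    ∀ fb, scanCombos target l fb =
      scanCand ((l.filter (fun p => decide (target ≤ p.2))).map (fun p => (p.2 - target, p.1))) fb := by
  induction l with
  | nil => intro fb; rfl
  | cons p rest ih =>
    intro fb
    obtain ⟨o, s⟩ := p
    by_cases he : s = target
    · subst he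
      simp [scanCombos, scanCand]
    · by_cases hge : target ≤ s
      · have hlt : target < s := lt_of_le_of_ne hge (fun h => he h.symm)
        have hne : ¬ (s - target = 0) := by omega
        simp only [scanCombos, if_neg he, List.filter_cons, decide_eq_true_eq, if_pos hge,
          List.map_cons, scanCand, hne]
        rw [ih]
        congr 1
        by_cases hfb : fb = none <;> simp [hfb, hlt]
      · have : ¬ (fb = none ∧ target < s) := by
          rintro ⟨_, h⟩; exact hge (le_of_lt h)
        simp only [scanCombos, if_neg he, if_neg this, List.filter_cons, decide_eq_true_eq,
          if_neg hge]
        exact ih fb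

theorem scanCand_append (l1 l2 : List (Int × List Int)) :
    ∀ fb, scanCand (l1 ++ l2) fb =
      (match scanCand l1 fb with
       | Sum.inr r => Sum.inr r
       | Sum.inl fb' => scanCand l2 fb') := by
  induction l1 with
  | nil => intro fb; rfl
  | cons c t ih =>
    intro fb
    by_cases hc : c.1 = 0 <;> simp [scanCand, hc, ih]

-- B's nested loops = one scan over A's flattened candidate list
theorem scanSizes_eq (target : Int) (options : List Int) (is : List Int) :
    ∀ fb, scanSizes target options is fb = scanCand
      (is.flatMap (fun i =>
        ((PySem.List.combinations options i.toNat).filter (fun o => decide (target ≤ o.sum))).map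
          (fun o => (o.sum - target, o)))) fb := by
  induction is with
  | nil => intro fb; rfl
  | cons i rest ih =>
    intro fb
    have hbatch : ((combosB options i.toNat).filter (fun p => decide (target ≤ p.2))).map
        (fun p => (p.2 - target, p.1)) =
        ((PySem.List.combinations options i.toNat).filter (fun o => decide (target ≤ o.sum))).map
          (fun o => (o.sum - target, o)) := by
      rw [combosB_eq, List.filter_map, List.map_map]
      rfl
    simp only [scanSizes, List.flatMap_cons]
    rw [scanCand_append, scanCombos_eq_scanCand, hbatch]
    cases scanCand (((PySem.List.combinations options i.toNat).filter
        (fun o => decide (target ≤ o.sum))).map (fun o => (o.sum - target, o))) fb with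
    | inl fb' => exact ih fb'
    | inr r => rfl

theorem scanSizes_eq_cands (target : Int) (options : List Int) :
    scanSizes target options (PySem.List.pyRange 1 ((options.length : Int) + 1) 1) none =
      scanCand (candsA target options) none := by
  rw [scanSizes_eq]; rfl

-- the scan returns the first exact candidate, else (fallback or) the head
theorem scanCand_char (L : List (Int × List Int)) :
    ∀ fb, scanCand L fb =
      (match L.find? (fun c => c.1 == 0) with
       | some e => Sum.inr e
       | none => Sum.inl (fb.orElse (fun _ => L.head?))) := by
  induction L with
  | nil => intro fb; cases fb <;> rfl
  | cons c t ih =>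
    intro fb
    by_cases hc : c.1 = 0
    · simp [scanCand, hc]
    · have hcb : (c.1 == 0) = false := by simp [hc]
      simp only [scanCand, if_neg hc, List.find?_cons, hcb, List.head?_cons]
      rw [ih]
      cases h : t.find? (fun c => c.1 == 0) with
      | some e => rfl
      | none =>
        by_cases hfb : fb = none
        · subst hfb; simp
        · obtain ⟨v, rfl⟩ := Option.ne_none_iff_exists'.mp hfb
          simp

-- every candidate's combo in candsA is nonempty
theorem candsA_len_pos (target : Int) (options : List Int) :
    ∀ c ∈ candsA target options, 1 ≤ c.2.length := by
  intro c hc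
  unfold candsA at hc
  obtain ⟨i, hi, hc⟩ := List.mem_flatMap.mp hc
  obtain ⟨o, ho, rfl⟩ := List.mem_map.mp hc
  have ho' := List.mem_of_mem_filter ho
  have hlen := PySem.List.length_of_mem_combinations ho'
  have hi1 : 1 ≤ i := (PySem.List.mem_pyRange_one.mp hi).1
  simp only [hlen]
  omega

-- combo lengths are nondecreasing along candsA (sizes are enumerated in increasing order)
theorem candsA_pairwise (target : Int) (options : List Int) :
    (candsA target options).Pairwise (fun c d => c.2.length ≤ d.2.length) := by
  unfold candsA
  have hpw : (PySem.List.pyRange 1 ((options.length : Int) + 1) 1).Pairwise (· ≤ ·) :=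
    (PySem.List.pairwise_lt_pyRange_one 1 ((options.length : Int) + 1)).imp le_of_lt
  have hlen : ∀ i : Int, ∀ c ∈ ((PySem.List.combinations options i.toNat).filter
      (fun o => decide (target ≤ o.sum))).map (fun o => (o.sum - target, o)),
      c.2.length = i.toNat := by
    intro i c hc
    obtain ⟨o, ho, rfl⟩ := List.mem_map.mp hc
    exact PySem.List.length_of_mem_combinations (List.mem_of_mem_filter ho)
  generalize hR : PySem.List.pyRange 1 ((options.length : Int) + 1) 1 = is at hpw
  clear hR
  induction is with
  | nil => simp
  | cons i rest ih =>
    simp only [List.flatMap_cons]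
    rw [List.pairwise_append]
    obtain ⟨hcross, hrest⟩ := List.pairwise_cons.mp hpw
    refine ⟨?_, ih hrest, ?_⟩
    · -- within one batch: all lengths equal
      have : ∀ c ∈ ((PySem.List.combinations options i.toNat).filter
          (fun o => decide (target ≤ o.sum))).map (fun o => (o.sum - target, o)),
          ∀ d ∈ ((PySem.List.combinations options i.toNat).filter
          (fun o => decide (target ≤ o.sum))).map (fun o => (o.sum - target, o)),
          c.2.length ≤ d.2.length := by
        intro c hc d hd
        rw [hlen i c hc, hlen i d hd]
      exact List.pairwise_of_forall_mem_list this
    · -- across batches: earlier size ≤ later size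
      intro c hc d hd
      obtain ⟨j, hj, hd'⟩ := List.mem_flatMap.mp hd
      rw [hlen i c hc, hlen j d hd']
      exact Int.toNat_le_toNat (hcross j hj)

-- ===== VERDICT (by name: the statement is the Claim_ definition above) =====
theorem solution_spec : Claim_equal_solution := by
  intro target options _ _
  unfold Spec_solution solution solution_alt
  -- A's side: head of the stable sort = first-wins strict argmin = first exact else head
  have hk : (fun p : Int × List Int => if p.1 = 0 then p.1 else ((p.2.length : Int))) = keyB := by
    funext p; unfold keyB; by_cases h : p.1 = 0 <;> simp [h]
  have hA := head_sorted_eq_argmin keyB (candsA target options)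
  rw [argmin_char _ (candsA_len_pos target options) (candsA_pairwise target options)] at hA
  -- B's side: the nested scan = first exact else head
  have hB := scanSizes_eq_cands target options
  rw [scanCand_char] at hB
  show (match PySem.List.sorted (candsA target options)
      (fun p => if p.1 = 0 then p.1 else (p.2.length : Int)) false with
    | [] => ((0 : Int), ([] : List Int))
    | p :: _ => p) = _
  rw [hk]
  cases hf : (candsA target options).find? (fun c => c.1 == 0) with
  | some e =>
    rw [hf] at hA hB
    have hBv : scanSizes target options (PySem.List.pyRange 1 ((options.length : Int) + 1) 1) none
        = Sum.inr e := hB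
    rw [hBv]
    cases hs : PySem.List.sorted (candsA target options) keyB false with
    | nil => rw [hs] at hA; simp at hA
    | cons p t => rw [hs] at hA; simp at hA; simp [hA]
  | none =>
    rw [hf] at hA hB
    simp only at hB
    cases hh : (candsA target options).head? with
    | none =>
      rw [hh] at hA hB
      simp only [Option.orElse_none] at hB
      rw [hB]
      cases hs : PySem.List.sorted (candsA target options) keyB false with
      | nil => rfl
      | cons p t => rw [hs] at hA; simp at hA
    | some h0 =>
      rw [hh] at hA hB
      simp only [Option.orElse_none] at hB
      rw [hB]
      cases hs : PySem.List.sorted (candsA target options) keyB false with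
      | nil => rw [hs] at hA; simp at hA
      | cons p t => rw [hs] at hA; simp at hA; simp [hA]
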